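-- pv_equiv track=rewrite | github.com/Gnccw/ID_code_search | simon.py | all_poss_bin_list
-- ===== SOURCE A (Python) =====
-- import copy
--
-- def all_poss_bin_list(a):
--     res=[[]]
--     num=1
--     for i in a:
--         if i==2:
--             num*=2
--             tmp=copy.deepcopy(res)
--             res=[]
--             for j in range(len(tmp)):
--                 res.append(tmp[j]+[0])
--                 res.append(tmp[j]+[1])
--                 res.append(tmp[j]+[2])
--         else:
--             for j in range(len(res)):
--                 res[j]=res[j]+[i]
--     return res
-- ===== SOURCE B (Python) =====
-- def all_poss_bin_list(a):
--     # Rank-based enumeration: count the wildcards (2s), then for each code in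
--     # range(3**k) decode its base-3 digits (most significant digit = leftmost 2)
--     # and substitute them into a copy of `a` left to right.
--     k = a.count(2)
--     out = []
--     for code in range(3 ** k):
--         digits = []
--         c = code
--         for _ in range(k):
--             digits.append(c % 3)
--             c //= 3
--         digits.reverse()
--         row = []
--         for v in a:
--             if v == 2:
--                 row.append(digits[0])
--                 digits = digits[1:]
--             else:
--                 row.append(v)
--         out.append(row)
--     return out
-- ===== Notes on version B (the rewrite author's own statement) =====
-- stated objective: alternative
-- what changed: Replaces A's incremental deepcopy-and-branch expansion of the result list with rank-based enumeration: count the 2s (k) and, for each code in range(3**k), decode its base-3 digits and substitute them into the list.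
import Mathlib
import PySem

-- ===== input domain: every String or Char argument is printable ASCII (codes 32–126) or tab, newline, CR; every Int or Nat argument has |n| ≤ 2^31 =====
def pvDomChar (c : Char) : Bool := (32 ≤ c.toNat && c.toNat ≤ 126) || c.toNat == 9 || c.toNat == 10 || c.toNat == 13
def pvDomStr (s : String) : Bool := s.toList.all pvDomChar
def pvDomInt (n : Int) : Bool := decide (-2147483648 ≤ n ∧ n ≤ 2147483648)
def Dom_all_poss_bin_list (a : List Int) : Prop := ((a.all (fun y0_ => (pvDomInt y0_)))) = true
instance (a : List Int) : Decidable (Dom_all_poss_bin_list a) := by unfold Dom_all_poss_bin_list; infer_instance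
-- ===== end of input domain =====

-- B replaces A's incremental deepcopy-and-branch expansion with rank-based enumeration:
-- count the 2s (k), then decode each code in range(3^k) into base-3 digits and substitute
-- them into the list (alternative decomposition; same cost).


-- ===== PORT A =====
-- state is (res, num), exactly as in the Python; num is updated but never read back
def all_poss_bin_list (a : List Int) : List (List Int) :=
  (a.foldl
    (fun (st : List (List Int) × Int) i =>
      if i = 2 then
        (st.1.foldl (fun acc t => acc ++ [t ++ [0], t ++ [1], t ++ [2]]) [], st.2 * 2)
      else
        (st.1.map (fun r => r ++ [i]), st.2))
    ([[]], 1)).1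

-- ===== PORT B =====
-- transliteration of Source B: k = a.count(2); for code in range(3**k): decode base-3
-- digits LSB-first then reverse; substitute into a copy of the list left to right.
-- digits[0] is ported as headD 0 (digits is nonempty whenever v == 2); digits[1:] as drop 1.
def all_poss_bin_list_alt (a : List Int) : List (List Int) :=
  let k : Nat := PySem.List.count a 2
  (PySem.List.pyRange 0 ((3 : Int) ^ k)).map (fun code =>
    let digits : List Int :=
      ((PySem.List.pyRange 0 (k : Int)).foldl
        (fun (st : List Int × Int) _ =>
          (st.1 ++ [PySem.Int.mod st.2 3], PySem.Int.floordiv st.2 3))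
        ([], code)).1.reverse
    (a.foldl
      (fun (st : List Int × List Int) v =>
        if v = 2 then (st.1 ++ [st.2.headD 0], st.2.drop 1) else (st.1 ++ [v], st.2))
      ([], digits)).1)

-- ===== PRECONDITION & SPEC =====
def Spec_all_poss_bin_list (a : List Int) (out : List (List Int)) : Prop := out = all_poss_bin_list_alt a
instance (a : List Int) (out : List (List Int)) : Decidable (Spec_all_poss_bin_list a out) := by unfold Spec_all_poss_bin_list; infer_instance

-- ===== CLAIM (what is proved, stated in full; the proofs are below) =====
def Claim_equal_all_poss_bin_list : Prop := ∀ (a : List Int), Dom_all_poss_bin_list a → Spec_all_poss_bin_list a (all_poss_bin_list a)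

-- ===== LEMMAS AND PROOFS =====

-- common reference form: the per-position Cartesian product, last position fastest
def pvOpts (i : Int) : List Int := if i = 2 then [0, 1, 2] else [i]

def pvProduct : List (List Int) → List (List Int)
  | [] => [[]]
  | o :: rest => o.flatMap (fun x => (pvProduct rest).map (fun p => x :: p))

-- base-3 digits, least significant first
def digLSB : Nat → Int → List Int
  | 0, _ => []
  | k+1, c => PySem.Int.mod c 3 :: digLSB k (PySem.Int.floordiv c 3)

-- recursion form of B's substitution loop
def substRec : List Int → List Int → List Int
  | [], _ => []
  | v :: rest, ds => if v = 2 then ds.headD 0 :: substRec rest (ds.drop 1) else v :: substRec rest ds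

-- ---- A-side: the expansion loop computes the Cartesian product ----
theorem foldl_triple_append (l : List (List Int)) (acc : List (List Int)) :
    l.foldl (fun acc t => acc ++ [t ++ [0], t ++ [1], t ++ [2]]) acc
      = acc ++ l.flatMap (fun t => [t ++ [0], t ++ [1], t ++ [2]]) := by
  induction l generalizing acc with
  | nil => simp
  | cons t l ih => simp [ih, List.flatMap_cons]

theorem aLoop_eq (l : List Int) (res : List (List Int)) (num : Int) :
    (l.foldl
      (fun (st : List (List Int) × Int) i =>
        if i = 2 then
          (st.1.foldl (fun acc t => acc ++ [t ++ [0], t ++ [1], t ++ [2]]) [], st.2 * 2)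
        else
          (st.1.map (fun r => r ++ [i]), st.2))
      (res, num)).1
      = res.flatMap (fun r => (pvProduct (l.map pvOpts)).map (fun p => r ++ p)) := by
  induction l generalizing res num with
  | nil => simp [pvProduct]
  | cons i l ih =>
    by_cases hi : i = 2
    · subst hi
      rw [List.foldl_cons]
      simp only [reduceIte]
      rw [ih, foldl_triple_append, List.nil_append]
      simp [pvProduct, pvOpts, List.flatMap_assoc, List.flatMap_cons, List.map_append,
        List.map_map, Function.comp_def, List.append_assoc]
    · rw [List.foldl_cons]
      simp only [if_neg hi]
      rw [ih]
      simp [pvProduct, pvOpts, hi, List.flatMap_map, List.flatMap_cons, List.map_map,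
        Function.comp_def]

-- ---- B-side: the digit fold and the substitution fold in recursion form ----
theorem digits_fold_eq (l : List Int) (acc : List Int) (c : Int) :
    (l.foldl
      (fun (st : List Int × Int) _ =>
        (st.1 ++ [PySem.Int.mod st.2 3], PySem.Int.floordiv st.2 3))
      (acc, c)).1 = acc ++ digLSB l.length c := by
  induction l generalizing acc c with
  | nil => simp [digLSB]
  | cons x l ih =>
    rw [List.foldl_cons, ih]
    simp only [List.length_cons, digLSB, List.append_assoc, List.singleton_append]

theorem subst_fold_eq (a : List Int) (acc ds : List Int) :
    (a.foldl
      (fun (st : List Int × List Int) v =>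
        if v = 2 then (st.1 ++ [st.2.headD 0], st.2.drop 1) else (st.1 ++ [v], st.2))
      (acc, ds)).1 = acc ++ substRec a ds := by
  induction a generalizing acc ds with
  | nil => simp [substRec]
  | cons v a ih =>
    rw [List.foldl_cons]
    by_cases hv : v = 2
    · subst hv
      rw [if_pos rfl, ih]
      simp only [substRec, reduceIte, List.append_assoc, List.singleton_append]
    · rw [if_neg hv, ih]
      simp only [substRec, if_neg hv, List.append_assoc, List.singleton_append]

-- ---- key digit lemma ----
theorem digLSB_split (k : Nat) (d r : Int) (hd0 : 0 ≤ d) (hd3 : d < 3)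
    (hr0 : 0 ≤ r) (hrk : r < 3 ^ k) :
    digLSB (k+1) (d * 3 ^ k + r) = digLSB k r ++ [d] := by
  induction k generalizing d r with
  | zero =>
    have : r = 0 := by omega
    subst this
    simp [digLSB]
    omega
  | succ k ih =>
    have h3 : (0:Int) < 3 := by norm_num
    have hp : (0:Int) < 3 ^ k := by positivity
    have hpow : d * 3 ^ (k+1) + r = 3 * (d * 3 ^ k) + r := by ring
    have hmod : PySem.Int.mod (d * 3 ^ (k+1) + r) 3 = PySem.Int.mod r 3 := by
      rw [PySem.Int.mod_eq_emod_of_pos h3, PySem.Int.mod_eq_emod_of_pos h3, hpow]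
      omega
    have hdiv : PySem.Int.floordiv (d * 3 ^ (k+1) + r) 3 = d * 3 ^ k + PySem.Int.floordiv r 3 := by
      rw [PySem.Int.floordiv_eq_ediv_of_pos h3, PySem.Int.floordiv_eq_ediv_of_pos h3, hpow]
      omega
    have hr0' : 0 ≤ PySem.Int.floordiv r 3 := by
      rw [PySem.Int.floordiv_eq_ediv_of_pos h3]; omega
    have hrk' : PySem.Int.floordiv r 3 < 3 ^ k := by
      rw [PySem.Int.floordiv_eq_ediv_of_pos h3]
      have h33 : r < 3 * 3 ^ k := by
        have : (3:Int) ^ (k+1) = 3 * 3 ^ k := by ring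
        omega
      omega
    have hL : digLSB (k+1+1) (d * 3 ^ (k+1) + r)
        = PySem.Int.mod (d * 3 ^ (k+1) + r) 3
          :: digLSB (k+1) (PySem.Int.floordiv (d * 3 ^ (k+1) + r) 3) := rfl
    have hR : digLSB (k+1) r = PySem.Int.mod r 3 :: digLSB k (PySem.Int.floordiv r 3) := rfl
    rw [hL, hR, hmod, hdiv, ih d (PySem.Int.floordiv r 3) hd0 hd3 hr0' hrk']
    simp only [List.cons_append]

-- shift a range
theorem map_pyRange_shift (m : Int) (_hm : 0 ≤ m) (d : Int) (f : Int → List Int) :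
    (PySem.List.pyRange (d * m) (d * m + m)).map f
      = (PySem.List.pyRange 0 m).map (fun r => f (d * m + r)) := by
  rw [PySem.List.pyRange_one, PySem.List.pyRange_one]
  simp [List.map_map, Function.comp_def]

-- ---- main B-side lemma: rank enumeration = Cartesian product ----
theorem bEnum_eq (a : List Int) :
    (PySem.List.pyRange 0 ((3:Int) ^ (List.count 2 a))).map
      (fun c => substRec a ((digLSB (List.count 2 a) c).reverse))
      = pvProduct (a.map pvOpts) := by
  induction a with
  | nil =>
    simp [pvProduct, PySem.List.pyRange_one, substRec, List.range_succ]
  | cons v rest ih =>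
    by_cases hv : v = 2
    · subst hv
      have hk : List.count 2 ((2:Int) :: rest) = List.count 2 rest + 1 := by
        simp
      rw [hk]
      set k := List.count 2 rest with hkdef
      set m : Int := (3:Int) ^ k with hmdef
      have hm0 : (0:Int) < m := by positivity
      have hsplit : PySem.List.pyRange 0 ((3:Int) ^ (k+1))
          = PySem.List.pyRange 0 m ++ PySem.List.pyRange m (2*m) ++ PySem.List.pyRange (2*m) (3*m) := by
        have h3 : (3:Int) ^ (k+1) = 3 * m := by rw [hmdef]; ring
        rw [h3]
        rw [PySem.List.pyRange_one_append 0 m (3*m) (by omega) (by omega)]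
        rw [PySem.List.pyRange_one_append m (2*m) (3*m) (by omega) (by omega)]
        rw [List.append_assoc]
      rw [hsplit]
      have hblock : ∀ d : Int, 0 ≤ d → d < 3 →
          (PySem.List.pyRange (d*m) (d*m + m)).map
            (fun c => substRec (2 :: rest) ((digLSB (k+1) c).reverse))
          = (pvProduct (rest.map pvOpts)).map (fun p => d :: p) := by
        intro d hd0 hd3
        rw [map_pyRange_shift m (le_of_lt hm0) d]
        have : ∀ r : Int, r ∈ PySem.List.pyRange 0 m →
            substRec (2 :: rest) ((digLSB (k+1) (d*m + r)).reverse)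
              = d :: substRec rest ((digLSB k r).reverse) := by
          intro r hr
          rw [PySem.List.mem_pyRange_one] at hr
          rw [digLSB_split k d r hd0 hd3 hr.1 (by rw [← hmdef]; exact hr.2)]
          simp [substRec]
        rw [List.map_congr_left this,
          show (fun r => d :: substRec rest ((digLSB k r).reverse))
            = (fun p => d :: p) ∘ (fun r => substRec rest ((digLSB k r).reverse)) from rfl,
          ← List.map_map, ih]
      have h0 : PySem.List.pyRange 0 m = PySem.List.pyRange ((0:Int)*m) ((0:Int)*m + m) := by norm_num
      have h1 : PySem.List.pyRange m (2*m) = PySem.List.pyRange ((1:Int)*m) ((1:Int)*m + m) := by norm_num; ring_nf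
      have h2 : PySem.List.pyRange (2*m) (3*m) = PySem.List.pyRange ((2:Int)*m) ((2:Int)*m + m) := by ring_nf
      rw [List.map_append, List.map_append, h0, h1, h2,
        hblock 0 (by norm_num) (by norm_num),
        hblock 1 (by norm_num) (by norm_num),
        hblock 2 (by norm_num) (by norm_num)]
      simp [pvProduct, pvOpts, List.flatMap_cons]
    · have hk : List.count 2 (v :: rest) = List.count 2 rest := by
        simp [hv]
      rw [hk]
      have : ∀ c : Int, substRec (v :: rest) ((digLSB (List.count 2 rest) c).reverse)
          = v :: substRec rest ((digLSB (List.count 2 rest) c).reverse) := by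
        intro c; simp [substRec, hv]
      simp only [this]
      rw [show (fun c => v :: substRec rest ((digLSB (List.count 2 rest) c).reverse))
            = (fun p => v :: p) ∘ (fun c => substRec rest ((digLSB (List.count 2 rest) c).reverse)) from rfl,
        ← List.map_map, ih]
      simp [pvProduct, pvOpts, hv, List.flatMap_cons]

-- ===== VERDICT (by name: the statement is the Claim_ definition above) =====
theorem all_poss_bin_list_spec : Claim_equal_all_poss_bin_list := by
  intro a _
  unfold Spec_all_poss_bin_list all_poss_bin_list all_poss_bin_list_alt
  rw [aLoop_eq]
  simp only [PySem.List.count_eq]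
  have hdig : ∀ c : Int,
      ((PySem.List.pyRange 0 ((List.count 2 a : Nat) : Int)).foldl
        (fun (st : List Int × Int) _ =>
          (st.1 ++ [PySem.Int.mod st.2 3], PySem.Int.floordiv st.2 3))
        ([], c)).1.reverse = (digLSB (List.count 2 a) c).reverse := by
    intro c
    rw [digits_fold_eq]
    simp [PySem.List.length_pyRange_one]
  calc ([[]] : List (List Int)).flatMap (fun r => (pvProduct (a.map pvOpts)).map (fun p => r ++ p))
      = pvProduct (a.map pvOpts) := by simp
    _ = (PySem.List.pyRange 0 ((3:Int) ^ (List.count 2 a))).map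
          (fun c => substRec a ((digLSB (List.count 2 a) c).reverse)) := (bEnum_eq a).symm
    _ = _ := by
        apply List.map_congr_left
        intro c _
        rw [subst_fold_eq, hdig c]
        simp
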